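-- pv_equiv track=rewrite | github.com/rixmit/UAV-ODF | Detector.py | getFoldsIndices
-- ===== SOURCE A (Python) =====
-- def getFoldsIndices(objectsIndices, foldsCount):
--     """
--     Return a list of folds, where each fold is a list of unique indices of objects
--     Each object (e.g. a Cow) has a unique index
--
--     :param objectsIndices:
--     :param foldsCount:
--     :return:
--     """
--
--     foldObjectsCount = [0]*foldsCount
--     objectsCount = len(objectsIndices)
--     while objectsCount > 0:
--         for idx in range(foldsCount):
--             if objectsCount > 0:
--                 foldObjectsCount[idx] += 1
--                 objectsCount -= 1
--             else:
--                 break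
--
--     foldsIndices = []
--     lastIndex = -1
--     for count in foldObjectsCount:
--         foldIndex = []
--         for idx in range(count):
--             lastIndex += 1
--             foldIndex.append(objectsIndices[lastIndex])
--
--         foldsIndices.append(foldIndex)
--
--     return foldsIndices
-- ===== SOURCE B (Python) =====
-- def getFoldsIndices(objectsIndices, foldsCount):
--     """Closed-form round-robin fold sizes: q+1 for the first r folds, q for the
--     rest (q, r = divmod(n, foldsCount)), then contiguous slices."""
--     q, r = divmod(len(objectsIndices), foldsCount)
--     folds = []
--     start = 0
--     for i in range(foldsCount):
--         size = q + 1 if i < r else q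
--         folds.append(objectsIndices[start:start + size])
--         start += size
--     return folds
-- ===== Notes on version B (the rewrite author's own statement) =====
-- stated objective: simpler
-- what changed: Replaces the O(n) round-robin counting while-loop and the element-by-element index-walking append loop with a divmod closed form for the fold sizes plus one slicing pass.
-- outside the precondition, e.g. on getFoldsIndices([], 0): A returns [], B raises ZeroDivisionError
import Mathlib
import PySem

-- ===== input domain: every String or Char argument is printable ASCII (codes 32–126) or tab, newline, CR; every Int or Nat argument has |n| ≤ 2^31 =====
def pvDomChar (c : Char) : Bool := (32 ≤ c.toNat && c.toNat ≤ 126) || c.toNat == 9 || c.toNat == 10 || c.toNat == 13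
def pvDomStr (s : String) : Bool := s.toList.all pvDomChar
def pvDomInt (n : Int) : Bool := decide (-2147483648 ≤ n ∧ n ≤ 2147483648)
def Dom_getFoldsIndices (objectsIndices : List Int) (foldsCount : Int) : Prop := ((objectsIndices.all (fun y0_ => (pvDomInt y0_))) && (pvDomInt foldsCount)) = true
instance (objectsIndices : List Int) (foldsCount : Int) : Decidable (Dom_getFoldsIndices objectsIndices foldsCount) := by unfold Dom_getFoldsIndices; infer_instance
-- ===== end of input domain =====

-- B replaces A's round-robin counting while-loop and index-walking appends by a
-- divmod closed form for fold sizes plus contiguous slices (objective: simpler).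


-- ===== PORT A =====
-- one pass of 'for idx in range(foldsCount)': bump leading entries while objectsCount > 0
def pvA_pass : List Int → Int → List Int × Int
  | [], r => ([], r)
  | c :: rest, r =>
      if r > 0 then
        let p := pvA_pass rest (r - 1)
        ((c + 1) :: p.1, p.2)
      else (c :: rest, r)

-- the 'while objectsCount > 0' loop; fuel = len(objectsIndices)+1 suffices on Pre_
-- (each pass removes at least one object when foldsCount > 0); Python diverges
-- exactly where the fuel could run out, and those inputs are outside Pre_.
def pvA_while : Nat → List Int → Int → List Int
  | 0, counts, _ => counts
  | fuel + 1, counts, r =>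
      if r > 0 then
        let p := pvA_pass counts r
        pvA_while fuel p.1 p.2
      else counts

-- 'for idx in range(count): lastIndex += 1; foldIndex.append(objectsIndices[lastIndex])'
-- pyGetD stands for objectsIndices[lastIndex]: in range on Pre_ (Python raises out of range)
def pvA_inner (objs : List Int) : Nat → Int → List Int × Int
  | 0, last => ([], last)
  | c + 1, last =>
      let x := PySem.List.pyGetD objs (last + 1) 0
      let p := pvA_inner objs c (last + 1)
      (x :: p.1, p.2)

-- 'for count in foldObjectsCount: …'
def pvA_build (objs : List Int) : List Int → Int → List (List Int)
  | [], _ => []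
  | c :: rest, last =>
      let p := pvA_inner objs c.toNat last
      p.1 :: pvA_build objs rest p.2

def getFoldsIndices (objectsIndices : List Int) (foldsCount : Int) : List (List Int) :=
  let counts := pvA_while (objectsIndices.length + 1)
      (List.replicate foldsCount.toNat 0) (objectsIndices.length : Int)
  pvA_build objectsIndices counts (-1)

-- ===== PORT B =====
-- 'for i in range(foldsCount): size = q+1 if i < r else q; append slice; start += size'
def pvB_loop (objs : List Int) (q r : Int) : List Int → Int → List (List Int)
  | [], _ => []
  | i :: rest, start =>
      let size := if i < r then q + 1 else q
      PySem.List.slice objs (some start) (some (start + size)) ::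
        pvB_loop objs q r rest (start + size)

def getFoldsIndices_alt (objectsIndices : List Int) (foldsCount : Int) : List (List Int) :=
  match PySem.Int.divmod? (objectsIndices.length : Int) foldsCount with
  | none => []   -- foldsCount = 0: Python B raises ZeroDivisionError (outside Pre_)
  | some (q, r) => pvB_loop objectsIndices q r (PySem.List.pyRange 0 foldsCount 1) 0

-- ===== PRECONDITION & SPEC =====
-- Pre_ excludes foldsCount = 0 (A returns [] only for empty input, while B raises
-- ZeroDivisionError) and foldsCount < 0 with nonempty input (A's while-loop diverges).
def Pre_getFoldsIndices (objectsIndices : List Int) (foldsCount : Int) : Prop :=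
  0 < foldsCount ∨ (objectsIndices = [] ∧ foldsCount < 0)
instance (objectsIndices : List Int) (foldsCount : Int) : Decidable (Pre_getFoldsIndices objectsIndices foldsCount) := by unfold Pre_getFoldsIndices; infer_instance

def pvWitness_getFoldsIndices : List Int × Int := ([3, 1, 4, 1, 5, 9, 2], 3)

def Spec_getFoldsIndices (objectsIndices : List Int) (foldsCount : Int) (out : List (List Int)) : Prop := out = getFoldsIndices_alt objectsIndices foldsCount
instance (objectsIndices : List Int) (foldsCount : Int) (out : List (List Int)) : Decidable (Spec_getFoldsIndices objectsIndices foldsCount out) := by unfold Spec_getFoldsIndices; infer_instance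

-- ===== CLAIM (what is proved, stated in full; the proofs are below) =====
def Claim_equal_getFoldsIndices : Prop := ∀ (objectsIndices : List Int) (foldsCount : Int), Dom_getFoldsIndices objectsIndices foldsCount → Pre_getFoldsIndices objectsIndices foldsCount → Spec_getFoldsIndices objectsIndices foldsCount (getFoldsIndices objectsIndices foldsCount)

-- ===== LEMMAS AND PROOFS =====

theorem pvA_pass_zero (counts : List Int) : pvA_pass counts 0 = (counts, 0) := by
  cases counts <;> simp [pvA_pass]

theorem pvA_pass_ge (counts : List Int) (r : Int) (h : (counts.length : Int) ≤ r) (h0 : 0 < r ∨ counts = []) :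
    pvA_pass counts r = (counts.map (· + 1), r - counts.length) := by
  induction counts generalizing r with
  | nil =>
      cases h0 with
      | inl _ => simp [pvA_pass]
      | inr _ => cases r <;> simp [pvA_pass]
  | cons c rest ih =>
      have hr : 0 < r := by
        cases h0 with
        | inl h1 => exact h1
        | inr h1 => simp at h1
      have := ih (r - 1) (by simp at h ⊢; omega)
        (by rcases Nat.eq_zero_or_pos rest.length with hl | hl
            · right; exact List.length_eq_zero_iff.mp hl
            · left; simp at h; omega)
      simp [pvA_pass, hr, this]
      omega

theorem pvA_pass_replicate_lt (c : Int) (k : Nat) (r : Int) (h0 : 0 ≤ r) (h : r < (k : Int)) :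
    pvA_pass (List.replicate k c) r =
      ((List.range k).map (fun i : Nat => c + if (i : Int) < r then 1 else 0), 0) := by
  induction k generalizing r with
  | zero => omega
  | succ k ih =>
      rcases eq_or_lt_of_le h0 with h0 | h0
      · subst h0
        rw [pvA_pass_zero]
        have hmap : (List.range (k + 1)).map (fun i : Nat => c + if (i : Int) < 0 then 1 else 0)
            = List.replicate (k + 1) c := by
          apply List.ext_getElem <;> simp
        rw [hmap]
      · by_cases hk : r - 1 < (k : Int)
        · have hrec := ih (r - 1) (by omega) hk
          rw [List.replicate_succ]
          simp [pvA_pass, h0, hrec, List.range_succ_eq_map]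
          intro a _
          by_cases hc : (a : Int) < r - 1
          · rw [if_pos hc, if_pos (by omega)]
          · rw [if_neg hc, if_neg (by omega)]
        · exfalso; push_cast at h; omega

theorem pvA_while_zero (fuel : Nat) (counts : List Int) : pvA_while fuel counts 0 = counts := by
  cases fuel <;> simp [pvA_while]

theorem pvA_while_replicate (fuel k : Nat) (c : Int) (r : Nat) (hk : 0 < k) (hfuel : r ≤ fuel) :
    pvA_while fuel (List.replicate k c) (r : Int) =
      (List.range k).map (fun i : Nat => c + ((r / k : Nat) : Int) + if (i : Int) < ((r % k : Nat) : Int) then 1 else 0) := by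
  induction fuel generalizing c r with
  | zero =>
      have hr0 : r = 0 := by omega
      subst hr0
      simp only [Nat.cast_zero, pvA_while, Nat.zero_div, Nat.zero_mod]
      apply List.ext_getElem <;> simp
  | succ fuel ih =>
      rcases Nat.eq_zero_or_pos r with hr | hr
      · subst hr
        simp only [Nat.cast_zero, pvA_while_zero, Nat.zero_div, Nat.zero_mod]
        apply List.ext_getElem <;> simp
      · by_cases hge : k ≤ r
        · -- full pass: all entries +1, recurse with r - k
          have hpass := pvA_pass_ge (List.replicate k c) (r : Int)
            (by simp; exact_mod_cast hge) (Or.inl (by exact_mod_cast hr))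
          have hmap : (List.replicate k c).map (· + 1) = List.replicate k (c + 1) := by
            simp [List.map_replicate]
          have hsub : ((r : Int) - (List.replicate k c).length) = ((r - k : Nat) : Int) := by
            simp; omega
          have hrec := ih (c + 1) (r - k) (by omega)
          show (if (r : Int) > 0 then _ else _) = _
          rw [if_pos (by exact_mod_cast hr)]
          simp only [hpass, hmap, hsub, hrec]
          have hq1 : 1 ≤ r / k := (Nat.one_le_div_iff hk).mpr hge
          have hdm := Nat.div_add_mod r k
          have hmlt := Nat.mod_lt r hk
          have hrk : r - k = k * (r / k - 1) + r % k := by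
            obtain ⟨t, ht⟩ := Nat.exists_eq_add_of_le hq1
            have h1t : 1 + t - 1 = t := by omega
            rw [ht, h1t]
            rw [ht, Nat.mul_add] at hdm
            omega
          have hdiv : (r - k) / k = r / k - 1 := by
            rw [hrk, Nat.mul_add_div hk, Nat.div_eq_of_lt hmlt, Nat.add_zero]
          have hmod : (r - k) % k = r % k := by
            rw [hrk, Nat.mul_add_mod, Nat.mod_eq_of_lt hmlt]
          rw [hdiv, hmod]
          apply List.map_congr_left
          intro i _
          have hcast : ((r / k : Nat) : Int) = ((r / k - 1 : Nat) : Int) + 1 := by omega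
          rw [hcast]; ring_nf
        · -- partial pass: the remainder lands on the first r entries, then r' = 0
          rw [Nat.not_le] at hge
          have hpass := pvA_pass_replicate_lt c k (r : Int) (by positivity) (by exact_mod_cast hge)
          show (if (r : Int) > 0 then _ else _) = _
          rw [if_pos (by exact_mod_cast hr)]
          simp only [hpass, pvA_while_zero]
          rw [Nat.div_eq_of_lt hge, Nat.mod_eq_of_lt hge]
          apply List.map_congr_left
          intro i _
          simp

theorem pvA_inner_eq (objs : List Int) (c : Nat) (start : Int) (h0 : 0 ≤ start)
    (hle : start + c ≤ (objs.length : Int)) :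
    pvA_inner objs c (start - 1) = ((objs.drop start.toNat).take c, start - 1 + c) := by
  induction c generalizing start with
  | zero => simp [pvA_inner]
  | succ c ih =>
      have hlt : start < (objs.length : Int) := by push_cast at hle; omega
      have hidx : start.toNat < objs.length := by omega
      have hget : PySem.List.pyGetD objs start 0 = objs[start.toNat] :=
        PySem.List.pyGetD_eq_getElem objs 0 h0 hlt
      have hrec := ih (start + 1) (by omega) (by push_cast at hle ⊢; omega)
      rw [show start + 1 - 1 = start by ring] at hrec
      have hdrop : objs.drop start.toNat = objs[start.toNat] :: objs.drop (start.toNat + 1) :=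
        List.drop_eq_getElem_cons hidx
      simp only [pvA_inner, show start - 1 + 1 = start from by ring, hget, hrec, Prod.mk.injEq]
      refine ⟨?_, by push_cast; ring⟩
      rw [show (start + 1).toNat = start.toNat + 1 from by omega, hdrop, List.take_succ_cons]

-- the common chunked form: A's walking build equals B's slicing loop
theorem pv_build_eq_loop (objs : List Int) (q r : Int) (hq : 0 ≤ q) (l : List Nat) (start : Int)
    (h0 : 0 ≤ start)
    (hle : start + ((l.map (fun i : Nat => if (i : Int) < r then q + 1 else q)).sum) ≤ (objs.length : Int)) :
    pvA_build objs (l.map (fun i : Nat => if (i : Int) < r then q + 1 else q)) (start - 1) =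
      pvB_loop objs q r (l.map (fun i : Nat => (i : Int))) start := by
  induction l generalizing start with
  | nil => simp [pvA_build, pvB_loop]
  | cons i rest ih =>
      simp only [List.map_cons, List.sum_cons] at hle ⊢
      simp only [pvA_build, pvB_loop]
      have hsumnn : 0 ≤ ((rest.map (fun i : Nat => if (i : Int) < r then q + 1 else q)).sum) := by
        apply List.sum_nonneg
        intro x hx
        simp at hx
        obtain ⟨_, _, hx⟩ := hx
        rw [← hx]; split <;> omega
      obtain ⟨s, hs⟩ : ∃ s : Int, (if (i : Int) < r then q + 1 else q) = s := ⟨_, rfl⟩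
      have hsnn : 0 ≤ s := by rw [← hs]; split <;> omega
      rw [hs] at hle ⊢
      have hcast : (s.toNat : Int) = s := by omega
      have hinner := pvA_inner_eq objs s.toNat start h0 (by rw [hcast]; omega)
      rw [hcast] at hinner
      rw [hinner]
      have hrec := ih (start + s) (by omega) (by omega)
      rw [show start + s - 1 = start - 1 + s by ring] at hrec
      rw [hrec]
      congr 1
      rw [PySem.List.slice_toNat objs h0 (by omega),
        show (start + s).toNat - start.toNat = s.toNat from by omega]

theorem pv_size_sum (k : Nat) (q : Int) (m : Nat) :
    ((List.range k).map (fun i : Nat => if (i : Int) < (m : Int) then q + 1 else q)).sum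
      = k * q + min k m := by
  induction k with
  | zero => simp
  | succ k ih =>
      rw [List.range_succ, List.map_append, List.sum_append, ih]
      simp only [List.map_cons, List.map_nil, List.sum_cons, List.sum_nil, add_zero]
      rcases Nat.lt_or_ge k m with hk | hk
      · rw [if_pos (by exact_mod_cast hk)]
        rw [show min k m = k from by omega, show min (k + 1) m = k + 1 from by omega]
        push_cast; ring
      · rw [if_neg (by omega)]
        rw [show min k m = m from by omega, show min (k + 1) m = m from by omega]
        push_cast; ring

-- ===== VERDICT (by name: the statement is the Claim_ definition above) =====
theorem getFoldsIndices_spec : Claim_equal_getFoldsIndices := by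
  intro objs k _ hpre
  unfold Spec_getFoldsIndices getFoldsIndices getFoldsIndices_alt
  rcases hpre with hk | ⟨hobjs, hk⟩
  · -- foldsCount > 0
    set n : Nat := objs.length with hn
    have hk0 : k ≠ 0 := by omega
    have hdm : PySem.Int.divmod? (n : Int) k
        = some (PySem.Int.floordiv (n : Int) k, PySem.Int.mod (n : Int) k) := by
      simp [PySem.Int.divmod?, PySem.Int.floordiv, PySem.Int.mod, hk0]
    have hkn : k = ((k.toNat : Nat) : Int) := by omega
    have hfd : PySem.Int.floordiv (n : Int) k = ((n / k.toNat : Nat) : Int) := by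
      rw [hkn]; exact PySem.Int.floordiv_natCast n k.toNat
    have hmd : PySem.Int.mod (n : Int) k = ((n % k.toNat : Nat) : Int) := by
      rw [hkn]; exact PySem.Int.mod_natCast n k.toNat
    rw [hdm, hfd, hmd]
    have hkt : 0 < k.toNat := by omega
    -- A's counts list in closed form
    have hw := pvA_while_replicate (n + 1) k.toNat 0 n hkt (by omega)
    have hcounts : pvA_while (n + 1) (List.replicate k.toNat 0) (n : Int)
        = (List.range k.toNat).map (fun i : Nat => if (i : Int) < ((n % k.toNat : Nat) : Int)
            then ((n / k.toNat : Nat) : Int) + 1 else ((n / k.toNat : Nat) : Int)) := by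
      rw [hw]
      apply List.map_congr_left
      intro i _
      split <;> ring
    rw [hcounts]
    -- the range over which B loops
    have hrange : PySem.List.pyRange 0 k 1 = (List.range k.toNat).map (fun i : Nat => (i : Int)) := by
      rw [PySem.List.pyRange_one]
      simp
    rw [hrange]
    rw [show (-1 : Int) = (0 : Int) - 1 by ring]
    apply pv_build_eq_loop objs _ _ (by positivity) _ 0 le_rfl
    rw [pv_size_sum k.toNat _ (n % k.toNat)]
    have hsum : k.toNat * (n / k.toNat) + min k.toNat (n % k.toNat) = n := by
      have h1 := Nat.div_add_mod n k.toNat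
      have h2 := Nat.mod_lt n hkt
      have h3 : min k.toNat (n % k.toNat) = n % k.toNat := by omega
      omega
    have hsumInt : (k.toNat : Int) * ((n / k.toNat : Nat) : Int)
        + ((min k.toNat (n % k.toNat) : Nat) : Int) = (n : Int) := by exact_mod_cast hsum
    rw [zero_add, hsumInt]
  · -- empty input, negative foldsCount: both return []
    subst hobjs
    have hkt : k.toNat = 0 := by omega
    have hk0 : k ≠ 0 := by omega
    simp [hkt, pvA_while, pvA_build, PySem.Int.divmod?, hk0,
      PySem.List.pyRange_one_eq_nil (by omega : k ≤ 0), pvB_loop]
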